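-- pv_equiv track=rewrite | github.com/CDog5/CSUtils | csutils/data/listtools.py | eping_pong
-- ===== SOURCE A (Python) =====
-- def eping_pong(inlist,stop=None):
--     lst = inlist+list(reversed(inlist[1:-1]))
--     iters=0
--     i = 0
--     while True:
--         if stop:
--             if iters >= stop:
--                 break
--         if i >= len(lst):
--             i = 0
--         yield lst[i]
--         i += 1
--         iters +=1
-- ===== SOURCE B (Python) =====
-- def eping_pong(inlist, stop=None):
--     # Bounce an index between the two ends instead of materialising the
--     # doubled list inlist + reversed(inlist[1:-1]).
--     n = len(inlist)
--     i = 0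
--     d = 1
--     iters = 0
--     while True:
--         if stop:
--             if iters >= stop:
--                 break
--         yield inlist[i]
--         iters += 1
--         if n > 1:
--             if not (0 <= i + d < n):
--                 d = -d
--             i += d
-- ===== Notes on version B (the rewrite author's own statement) =====
-- stated objective: alternative
-- what changed: B never builds the doubled list inlist+reversed(inlist[1:-1]); it bounces an index between the two ends with a direction flag, yielding inlist[i] directly (O(1) extra space vs O(n)).
-- outside the precondition, e.g. on eping_pong([], None): A raises IndexError, B raises IndexError; on eping_pong([], 2): A raises IndexError, B raises IndexError
import Mathlib
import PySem

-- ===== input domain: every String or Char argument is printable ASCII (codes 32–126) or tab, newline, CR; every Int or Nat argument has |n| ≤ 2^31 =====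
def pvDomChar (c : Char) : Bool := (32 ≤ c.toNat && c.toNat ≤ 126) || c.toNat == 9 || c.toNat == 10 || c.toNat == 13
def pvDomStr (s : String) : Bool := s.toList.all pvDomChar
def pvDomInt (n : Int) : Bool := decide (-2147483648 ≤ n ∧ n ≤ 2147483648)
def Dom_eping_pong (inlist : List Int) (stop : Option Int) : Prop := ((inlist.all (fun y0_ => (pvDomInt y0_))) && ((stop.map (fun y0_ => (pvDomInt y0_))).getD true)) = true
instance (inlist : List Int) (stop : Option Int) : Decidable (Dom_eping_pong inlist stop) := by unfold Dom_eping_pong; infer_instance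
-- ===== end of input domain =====

-- B bounces an index between the two ends with a direction flag instead of
-- materialising the doubled list inlist + reversed(inlist[1:-1]); same yields.

-- ===== PORT A =====
-- lst = inlist + list(reversed(inlist[1:-1]))
def pingLst (inlist : List Int) : List Int :=
  inlist ++ (PySem.List.slice inlist (some 1) (some (-1))).reverse

-- A's while loop, run for the number of yields Pre_ guarantees (stop = some s, 0 < s).
-- lst[i] is lst.getD i 0: exact because under Pre_ lst ≠ [] and the index is in [0, len lst).
def pingGoA (lst : List Int) : Nat → Nat → List Int
  | 0, _ => []
  | n + 1, i =>
    let i' := if lst.length ≤ i then 0 else i   -- if i >= len(lst): i = 0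
    lst.getD i' 0 :: pingGoA lst n (i' + 1)

def eping_pong (inlist : List Int) (stop : Option Int) : List Int :=
  let lst := pingLst inlist
  match stop with
  | none => []        -- 'if stop:' never fires: Python diverges; excluded by Pre_
  | some s =>
    if s ≤ 0 then []  -- s < 0: truthy, iters >= stop at once, A returns [];
                      -- s = 0: falsy, Python diverges (excluded by Pre_)
    else pingGoA lst s.toNat 0

-- ===== PORT B =====
-- B's while loop: yield inlist[i], then bounce i by direction d inside [0, n-1].
def pingGoB (inlist : List Int) : Nat → Int → Int → List Int
  | 0, _, _ => []
  | n + 1, i, d =>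
    let x := PySem.List.pyGetD inlist i 0   -- inlist[i]; in range under Pre_
    if 1 < inlist.length then
      let d' := if 0 ≤ i + d ∧ i + d < (inlist.length : Int) then d else -d
      x :: pingGoB inlist n (i + d') d'
    else
      x :: pingGoB inlist n i d

def eping_pong_alt (inlist : List Int) (stop : Option Int) : List Int :=
  match stop with
  | none => []        -- diverges in Python, like A; excluded by Pre_
  | some s =>
    if s ≤ 0 then []
    else pingGoB inlist s.toNat 0 1

-- ===== PRECONDITION & SPEC =====
-- Pre_ excludes exactly the inputs where the materialised generator does not return a value:
-- stop None or 0 (the loop never breaks, list(...) diverges) and inlist = [] with positive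
-- stop (the first yield evaluates lst[0] and raises IndexError).
def Pre_eping_pong (inlist : List Int) (stop : Option Int) : Prop :=
  stop ≠ none ∧ stop.getD 0 ≠ 0 ∧ (stop.getD 0 < 0 ∨ inlist ≠ [])
instance (inlist : List Int) (stop : Option Int) : Decidable (Pre_eping_pong inlist stop) := by
  unfold Pre_eping_pong; infer_instance

def pvWitness_eping_pong : List Int × Option Int := ([1, 2, 3], some 7)

def Spec_eping_pong (inlist : List Int) (stop : Option Int) (out : List Int) : Prop := out = eping_pong_alt inlist stop
instance (inlist : List Int) (stop : Option Int) (out : List Int) : Decidable (Spec_eping_pong inlist stop out) := by unfold Spec_eping_pong; infer_instance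

-- ===== CLAIM (what is proved, stated in full; the proofs are below) =====
def Claim_equal_eping_pong : Prop := ∀ (inlist : List Int) (stop : Option Int), Dom_eping_pong inlist stop → Pre_eping_pong inlist stop → Spec_eping_pong inlist stop (eping_pong inlist stop)

-- ===== LEMMAS AND PROOFS =====

-- inlist[1:-1] is tail-then-dropLast
theorem pingMid_eq (xs : List Int) :
    PySem.List.slice xs (some 1) (some (-1)) = xs.tail.dropLast := by
  cases xs with
  | nil => rfl
  | cons a t =>
    simp [PySem.List.slice, PySem.List.clampIdx, List.dropLast_eq_take]
    rw [if_neg (by omega)]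
    omega

theorem pingLst_length (inlist : List Int) (h2 : 2 ≤ inlist.length) :
    (pingLst inlist).length = 2 * inlist.length - 2 := by
  simp [pingLst, pingMid_eq]
  omega

theorem pingLst_get_low (inlist : List Int) (j : Nat) (hj : j < inlist.length) :
    (pingLst inlist).getD j 0 = inlist.getD j 0 := by
  unfold pingLst
  rw [List.getD_eq_getElem _ _ (by simpa using Nat.lt_of_lt_of_le hj (by simp)),
      List.getD_eq_getElem _ _ hj, List.getElem_append_left hj]

theorem pingLst_get_high (inlist : List Int) (h2 : 2 ≤ inlist.length) (j : Nat)
    (hn : inlist.length ≤ j) (hj : j < 2 * inlist.length - 2) :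
    (pingLst inlist).getD j 0 = inlist.getD (2 * inlist.length - 2 - j) 0 := by
  have hL := pingLst_length inlist h2
  have hmid : PySem.List.slice inlist (some 1) (some (-1)) = inlist.tail.dropLast :=
    pingMid_eq inlist
  have hml : inlist.tail.dropLast.length = inlist.length - 2 := by simp; omega
  rw [List.getD_eq_getElem _ _ (by omega), List.getD_eq_getElem _ _ (by omega)]
  unfold pingLst
  rw [List.getElem_append_right (by omega)]
  simp only [hmid, List.getElem_reverse, List.getElem_dropLast, List.getElem_tail]
  congr 1
  omega

theorem mod_shift (L j k : Nat) : ((j + 1) % L + k) % L = (j + (k + 1)) % L := by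
  rw [Nat.mod_add_mod]; congr 1; omega

-- A's loop yields lst[(j+k) % len lst] at step k
theorem pingGoA_char (lst : List Int) (hL : lst ≠ []) :
    ∀ (m j : Nat), j ≤ lst.length →
      pingGoA lst m j = (List.range m).map (fun k => lst.getD ((j + k) % lst.length) 0) := by
  intro m
  induction m with
  | zero => intro j _; simp [pingGoA]
  | succ m ih =>
    intro j hj
    have hL0 : 0 < lst.length := List.length_pos_of_ne_nil hL
    have hi' : (if lst.length ≤ j then 0 else j) = j % lst.length := by
      split
      · have hjL : j = lst.length := by omega
        simp [hjL]
      · exact (Nat.mod_eq_of_lt (by omega)).symm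
    show lst.getD (if lst.length ≤ j then 0 else j) 0 ::
        pingGoA lst m ((if lst.length ≤ j then 0 else j) + 1) = _
    rw [hi', ih (j % lst.length + 1) (by have := Nat.mod_lt j hL0; omega),
        List.range_succ_eq_map, List.map_cons, List.map_map]
    refine congrArg₂ List.cons (by simp) ?_
    apply List.map_congr_left
    intro k _
    show lst.getD ((j % lst.length + 1 + k) % lst.length) 0 = _
    have h1 : j % lst.length + 1 + k = j % lst.length + (1 + k) := by omega
    rw [h1, Nat.mod_add_mod]
    simp only [Function.comp, Nat.succ_eq_add_one]
    congr 2
    omega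

-- B's loop on a singleton list never moves the index
theorem pingGoB_one (inlist : List Int) (h1 : inlist.length = 1) :
    ∀ (m : Nat) (i d : Int),
      pingGoB inlist m i d = (List.range m).map (fun _ => PySem.List.pyGetD inlist i 0) := by
  intro m
  induction m with
  | zero => intro i d; simp [pingGoB]
  | succ m ih =>
    intro i d
    show (if 1 < inlist.length then _ else _) = _
    rw [if_neg (by omega), List.range_succ_eq_map, List.map_cons, List.map_map, ih i d]
    rfl

-- B's bouncing index, read through the doubled list: with j the current position in the
-- cycle of length L = 2n-2, each step yields lst[(j+k) % L]
theorem pingGoB_char (inlist : List Int) (h2 : 2 ≤ inlist.length) :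
    ∀ (m : Nat) (i d : Int) (j : Nat),
      ((d = 1 ∧ 0 ≤ i ∧ i < (inlist.length : Int) ∧ (j : Int) = i) ∨
       (d = -1 ∧ 0 ≤ i ∧ i ≤ (inlist.length : Int) - 2 ∧
         (j : Int) = (if i = 0 then 0 else 2 * (inlist.length : Int) - 2 - i))) →
      pingGoB inlist m i d =
        (List.range m).map (fun k => (pingLst inlist).getD ((j + k) % (pingLst inlist).length) 0) := by
  intro m
  induction m with
  | zero => intro i d j _; simp [pingGoB]
  | succ m ih =>
    intro i d j hinv
    have hL : (pingLst inlist).length = 2 * inlist.length - 2 := pingLst_length inlist h2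
    have hjL : j < (pingLst inlist).length := by
      rw [hL]
      rcases hinv with ⟨_,_,_,hj⟩|⟨_,_,_,hj⟩
      · omega
      · split at hj <;> omega
    have hiN : 0 ≤ i ∧ i < (inlist.length : Int) := by
      rcases hinv with ⟨_,h0,h1,_⟩|⟨_,h0,h1,_⟩ <;> exact ⟨h0, by omega⟩
    -- the head: inlist[i] = lst[j]
    have hhead : PySem.List.pyGetD inlist i 0 = (pingLst inlist).getD (j % (pingLst inlist).length) 0 := by
      rw [Nat.mod_eq_of_lt hjL,
          PySem.List.pyGetD_eq_getElem inlist 0 hiN.1 hiN.2]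
      rcases hinv with ⟨_,_,_,hj⟩|⟨hd,h0,h1,hj⟩
      · rw [pingLst_get_low inlist j (by omega), List.getD_eq_getElem _ _ (by omega)]
        congr 1
        omega
      · by_cases hi0 : i = 0
        · rw [if_pos hi0] at hj
          rw [pingLst_get_low inlist j (by omega), List.getD_eq_getElem _ _ (by omega)]
          congr 1
          omega
        · rw [if_neg hi0] at hj
          rw [pingLst_get_high inlist h2 j (by omega) (by omega),
              List.getD_eq_getElem _ _ (by omega)]
          congr 1
          omega
    show (if 1 < inlist.length then _ else _) = _
    rw [if_pos (by omega)]
    -- the next state satisfies the invariant at j' = (j+1) % L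
    have hstep : pingGoB inlist m
        (i + (if 0 ≤ i + d ∧ i + d < (inlist.length : Int) then d else -d))
        (if 0 ≤ i + d ∧ i + d < (inlist.length : Int) then d else -d) =
        (List.range m).map (fun k =>
          (pingLst inlist).getD (((j + 1) % (pingLst inlist).length + k) % (pingLst inlist).length) 0) := by
      apply ih
      rcases hinv with ⟨hd,h0,h1,hj⟩|⟨hd,h0,h1,hj⟩
      · subst hd
        by_cases hc : 0 ≤ i + 1 ∧ i + 1 < (inlist.length : Int)
        · -- keep moving right
          rw [if_pos hc]
          left
          refine ⟨rfl, by omega, hc.2, ?_⟩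
          have hjlt : j + 1 < (pingLst inlist).length := by rw [hL]; omega
          rw [Nat.mod_eq_of_lt hjlt]; push_cast; omega
        · -- at the right end: flip to -1, i' = n - 2
          rw [if_neg hc]
          right
          refine ⟨rfl, by omega, by omega, ?_⟩
          by_cases hn2 : inlist.length = 2
          · -- i' = 0, j+1 = L wraps to 0
            have hiv : i = 1 := by omega
            have : j + 1 = (pingLst inlist).length := by rw [hL]; omega
            rw [this, Nat.mod_self, if_pos (by omega)]
            simp
          · have hjlt : j + 1 < (pingLst inlist).length := by rw [hL]; omega
            rw [Nat.mod_eq_of_lt hjlt, if_neg (by omega)]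
            push_cast; omega
      · subst hd
        by_cases hi0 : i = 0
        · -- at the left end: flip to +1, i' = 1
          subst hi0
          rw [if_neg (by omega)]
          left
          refine ⟨by norm_num, by norm_num, by omega, ?_⟩
          rw [if_pos rfl] at hj
          have hj0 : j = 0 := by omega
          have hjlt : j + 1 < (pingLst inlist).length := by rw [hL]; omega
          rw [Nat.mod_eq_of_lt hjlt]
          push_cast; omega
        · -- keep moving left
          rw [if_pos (by omega)]
          right
          rw [if_neg hi0] at hj
          refine ⟨rfl, by omega, by omega, ?_⟩
          by_cases hi1 : i = 1
          · -- i' = 0, j + 1 = L wraps to 0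
            have : j + 1 = (pingLst inlist).length := by rw [hL]; omega
            rw [this, Nat.mod_self, if_pos (by omega)]
            simp
          · have hjlt : j + 1 < (pingLst inlist).length := by rw [hL]; omega
            rw [Nat.mod_eq_of_lt hjlt, if_neg (by omega)]
            push_cast; omega
    rw [hstep, List.range_succ_eq_map, List.map_cons, List.map_map]
    refine congrArg₂ List.cons hhead ?_
    apply List.map_congr_left
    intro k _
    simp only [Function.comp]
    rw [mod_shift]

theorem eping_pong_spec : Claim_equal_eping_pong := by
  intro inlist stop _ hpre
  unfold Spec_eping_pong
  obtain ⟨hne, hnz, hor⟩ := hpre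
  cases stop with
  | none => exact absurd rfl hne
  | some s =>
    show (if s ≤ 0 then [] else pingGoA (pingLst inlist) s.toNat 0) =
         (if s ≤ 0 then [] else pingGoB inlist s.toNat 0 1)
    by_cases hs : s ≤ 0
    · simp [hs]
    · rw [if_neg hs, if_neg hs]
      simp only [Option.getD_some] at hnz hor
      have hnil : inlist ≠ [] := by
        rcases hor with h | h
        · omega
        · exact h
      have hn1 : 1 ≤ inlist.length := by
        cases inlist with
        | nil => exact absurd rfl hnil
        | cons a t => simp
      by_cases h2 : 2 ≤ inlist.length
      · -- the bouncing index walks the doubled list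
        have hLpos : (pingLst inlist).length ≠ 0 := by
          rw [pingLst_length inlist h2]; omega
        rw [pingGoA_char (pingLst inlist) (by
              intro h; exact hLpos (by rw [h]; rfl)) s.toNat 0 (Nat.zero_le _),
            pingGoB_char inlist h2 s.toNat 0 1 0 (Or.inl ⟨rfl, le_refl 0, by omega, by norm_num⟩)]
      · -- singleton list: both sides repeat inlist[0]
        have h1 : inlist.length = 1 := by omega
        have hlst : pingLst inlist = inlist := by
          unfold pingLst
          rw [pingMid_eq]
          cases inlist with
          | nil => rfl
          | cons a t =>
            cases t with
            | nil => rfl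
            | cons b u => simp at h1
        rw [pingGoB_one inlist h1 s.toNat 0 1,
            pingGoA_char (pingLst inlist) (by rw [hlst]; exact hnil) s.toNat 0 (Nat.zero_le _)]
        apply List.map_congr_left
        intro k _
        rw [hlst, h1, Nat.mod_one, PySem.List.pyGetD_zero]
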